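-- pv_equiv track=rewrite | github.com/wilke/Programs-DG | Read_seq_grapher.py | mut_pos_stringer
-- ===== SOURCE A (Python) =====
-- def mut_pos_stringer(muts):
--     mut_pos_string = ''
--     for mut in muts.split(' '):
--         mut_pos = ''
--         for c in mut.split('(')[0].strip('ATCGN'):
--             if c.isdigit():
--                 mut_pos += c
--             else:
--                 break
--         mut_pos_string += f"{int(mut_pos):06d} "
--     return(mut_pos_string)
-- ===== SOURCE B (Python) =====
-- # One pass over the raw string (with a sentinel space appended): a small state
-- # machine per token, instead of A's staged split(' ')/split('(')/strip('ATCGN')/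
-- # digit-substring/int() pipeline. No splitting, no slicing, no re-parse.
-- def mut_pos_stringer(muts):
--     out = []
--     n = None      # numeric value of the token's leading digit run, built on the fly
--     done = False  # set once the token's digit run (or any chance of one) is over
--     for c in muts + ' ':
--         if c == ' ':
--             out.append('%06d ' % n)
--             n, done = None, False
--         elif done:
--             pass
--         elif c.isdigit():
--             n = (0 if n is None else n) * 10 + ord(c) - 48
--         elif n is None and c in 'ATCGN':
--             pass
--         else:
--             done = True
--     return ''.join(out)
-- ===== Notes on version B (the rewrite author's own statement) =====
-- stated objective: alternative
-- what changed: B replaces A's staged per-token pipeline (split(' '), split('('), two-sided strip('ATCGN'), building a digit substring, int() re-parse) by a single left-to-right state-machine pass over the raw string with a sentinel space: per token it skips the ATCGN prefix, accumulates the digit run numerically, then ignores the rest until the next space.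
-- outside the precondition, e.g. on mut_pos_stringer(''): A raises ValueError, B raises TypeError; on mut_pos_stringer('ATCGN'): A raises ValueError, B raises TypeError; on mut_pos_stringer('('): A raises ValueError, B raises TypeError
import Mathlib
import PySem

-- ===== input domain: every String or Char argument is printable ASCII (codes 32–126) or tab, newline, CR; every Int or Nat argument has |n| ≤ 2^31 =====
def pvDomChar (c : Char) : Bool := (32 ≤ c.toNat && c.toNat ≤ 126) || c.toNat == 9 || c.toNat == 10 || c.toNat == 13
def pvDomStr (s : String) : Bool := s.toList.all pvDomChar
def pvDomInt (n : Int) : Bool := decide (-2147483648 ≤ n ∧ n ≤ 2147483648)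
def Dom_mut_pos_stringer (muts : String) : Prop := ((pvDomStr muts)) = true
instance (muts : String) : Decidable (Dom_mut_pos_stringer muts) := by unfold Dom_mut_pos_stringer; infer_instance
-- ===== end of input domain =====

-- B replaces A's staged per-token pipeline (split(' '), split('('), strip('ATCGN'),
-- digit substring, int()) by one state-machine pass over the raw string with a sentinel
-- space appended (objective: alternative; return value only — no argument is mutated).

-- ===== PORT A =====
-- 'ATCGN' membership, as in .strip('ATCGN') / c in 'ATCGN'
def pvMemATCGN (c : Char) : Bool := (['A','T','C','G','N'] : List Char).contains c

-- the f"{…:06d}" / '%06d ' % … formatting both Pythons apply (= str(n).zfill(6))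
def pvFmt06 (n : Int) : List Char := PySem.Chars.zfill (PySem.Int.toChars n) 6

-- the inner 'for c in …: if c.isdigit(): mut_pos += c else: break' loop
def pvDigitsA : List Char → List Char → List Char
  | [], acc => acc
  | c :: rest, acc => if PySem.Chars.isdigit c then pvDigitsA rest (acc ++ [c]) else acc

-- hand port of int(s) for the only arguments A passes here: runs of ASCII digits.
-- int() raises ValueError on '' (→ none; excluded by Pre_), else returns the base-10
-- value. (PySem.Int.ofChars? computes the same values on this argument shape; its
-- digit-run parser is a private definition, so this digit-only case is ported by hand.)
def pvIntDigits? : List Char → Option Int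
  | [] => none
  | ds => some (ds.foldl (fun m c => m * 10 + (c.toNat : Int) - 48) 0)

-- one iteration of A's outer loop: mut.split('(')[0].strip('ATCGN'), the digit loop,
-- then f"{int(mut_pos):06d} "  ([0] on a split result never raises: split is nonempty;
-- .getD 0 is unreachable under Pre_, where int() returns)
def pvPieceA (m_ : List Char) : List Char :=
  pvFmt06 ((pvIntDigits?
      (pvDigitsA (PySem.Chars.stripChars ((PySem.Chars.splitOn m_ ['(']).headD [])
        ['A','T','C','G','N']) [])).getD 0) ++ [' ']

def mut_pos_stringer (muts : String) : String :=
  String.mk ((PySem.Chars.splitOn muts.toList [' ']).foldl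
    (fun acc m_ => acc ++ pvPieceA m_) [])

-- ===== PORT B =====
-- one step of B's loop over muts + ' '; state = (out, n, done); n = None ↦ none
-- ('%06d ' % None raises TypeError in B; that happens only where int('') raises in A,
-- outside Pre_, so the port's .getD 0 there is unreachable under Pre_)
def pvStepB (st : List (List Char) × Option Int × Bool) (c : Char) :
    List (List Char) × Option Int × Bool :=
  if c = ' ' then (st.1 ++ [pvFmt06 (st.2.1.getD 0) ++ [' ']], none, false)
  else if st.2.2 then st
  else if PySem.Chars.isdigit c then
    (st.1, some (st.2.1.getD 0 * 10 + (c.toNat : Int) - 48), st.2.2)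
  else if st.2.1 = none ∧ pvMemATCGN c = true then st
  else (st.1, st.2.1, true)

def mut_pos_stringer_alt (muts : String) : String :=
  String.mk (PySem.Chars.join []
    (((muts.toList ++ [' ']).foldl pvStepB ([], none, false)).1))

-- ===== PRECONDITION & SPEC =====
-- Pre_ excludes exactly the inputs on which A raises ValueError (int('')): some token
-- whose part before '(' has no digit right after its leading run of 'ATCGN' characters.
def Pre_mut_pos_stringer (muts : String) : Prop :=
  ∀ t ∈ PySem.Chars.splitOn muts.toList [' '],
    PySem.Chars.isdigit
      (((t.takeWhile (fun c => c != '(')).dropWhile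
          (fun c => (['A','T','C','G','N'] : List Char).contains c)).headD ' ') = true
instance (muts : String) : Decidable (Pre_mut_pos_stringer muts) := by
  unfold Pre_mut_pos_stringer; infer_instance

def pvWitness_mut_pos_stringer : String := "12 G34(x) ATC56N"

def Spec_mut_pos_stringer (muts : String) (out : String) : Prop := out = mut_pos_stringer_alt muts
instance (muts : String) (out : String) : Decidable (Spec_mut_pos_stringer muts out) := by
  unfold Spec_mut_pos_stringer; infer_instance

-- ===== CLAIM (what is proved, stated in full; the proofs are below) =====
def Claim_equal_mut_pos_stringer : Prop := ∀ (muts : String), Dom_mut_pos_stringer muts → Pre_mut_pos_stringer muts → Spec_mut_pos_stringer muts (mut_pos_stringer muts)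

-- ===== LEMMAS AND PROOFS =====

-- character facts
lemma pvMem_not_lpar {c : Char} (h : pvMemATCGN c = true) : (c != '(') = true := by
  simp [pvMemATCGN] at h
  rcases h with h | h | h | h | h <;> subst h <;> decide

lemma pvMem_not_digit {c : Char} (h : pvMemATCGN c = true) : PySem.Chars.isdigit c = false := by
  simp [pvMemATCGN] at h
  rcases h with h | h | h | h | h <;> subst h <;> decide

lemma pvDigit_not_lpar {c : Char} (h : PySem.Chars.isdigit c = true) : (c != '(') = true := by
  simp [PySem.Chars.isdigit] at h
  simp only [bne_iff_ne]
  rintro rfl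
  exact absurd h.1 (by decide)

-- A's digit loop is the leading digit run
lemma pvDigitsA_eq (l acc : List Char) :
    pvDigitsA l acc = acc ++ l.takeWhile PySem.Chars.isdigit := by
  induction l generalizing acc with
  | nil => simp [pvDigitsA]
  | cons c rest ih =>
      rw [pvDigitsA, List.takeWhile_cons]
      by_cases h : PySem.Chars.isdigit c = true
      · simp [h, ih]
      · simp [h]

-- int() of a nonempty digit run
lemma pvIntDigits?_cons (c : Char) (rest : List Char) :
    pvIntDigits? (c :: rest) =
      some ((c :: rest).foldl (fun m c => m * 10 + (c.toNat : Int) - 48) 0) := rfl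

-- splitOn.go: the accumulator is a reversed prefix of the result
lemma pvGo_acc (sep : List Char) (fuel : Nat) :
    ∀ (l cur : List Char) (acc : List (List Char)),
      PySem.Chars.splitOn.go sep fuel l cur acc
        = acc.reverse ++ PySem.Chars.splitOn.go sep fuel l cur [] := by
  induction fuel with
  | zero => intro l cur acc; simp [PySem.Chars.splitOn.go]
  | succ fuel ih =>
      intro l cur acc
      cases l with
      | nil => simp [PySem.Chars.splitOn.go]
      | cons c rest =>
          rw [PySem.Chars.splitOn.go, PySem.Chars.splitOn.go]
          by_cases h : sep.isPrefixOf (c :: rest) = true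
          · simp only [h, if_true]
            rw [ih _ _ (cur.reverse :: acc), ih _ _ [cur.reverse]]
            simp
          · simp only [h, Bool.false_eq_true, if_false]
            exact ih rest (c :: cur) acc

-- full structure of a single-char split: head field, and the tail is a fresh split
lemma pvGo_split (sc : Char) :
    ∀ (l cur : List Char),
      PySem.Chars.splitOn.go [sc] (l.length + 1) l cur []
        = (cur.reverse ++ l.takeWhile (fun c => c != sc)) ::
          (match l.dropWhile (fun c => c != sc) with
           | [] => []
           | _ :: rest => PySem.Chars.splitOn rest [sc]) := by
  intro l
  induction l with
  | nil => intro cur; simp [PySem.Chars.splitOn.go]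
  | cons c rest ih =>
      intro cur
      rw [List.length_cons, PySem.Chars.splitOn.go]
      by_cases h : c = sc
      · subst h
        have hpref : ([c] : List Char).isPrefixOf (c :: rest) = true := by
          simp [List.isPrefixOf]
        simp only [hpref, if_true, List.length_cons, List.drop_succ_cons, List.drop_zero]
        rw [pvGo_acc]
        have hne : (c != c) = false := by simp
        rw [List.takeWhile_cons, List.dropWhile_cons]
        simp only [hne, Bool.false_eq_true, if_false]
        simp [PySem.Chars.splitOn]
      · have hpref : ([sc] : List Char).isPrefixOf (c :: rest) = false := by
          simp [List.isPrefixOf]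
          exact fun hh => absurd hh.symm h
        simp only [hpref, Bool.false_eq_true, if_false]
        have hne : (c != sc) = true := by simpa [bne_iff_ne] using h
        rw [ih (c :: cur), List.takeWhile_cons, List.dropWhile_cons]
        simp [hne]

lemma pvSplitOn_eq (l : List Char) (sc : Char) :
    PySem.Chars.splitOn l [sc]
      = (l.takeWhile (fun c => c != sc)) ::
          (match l.dropWhile (fun c => c != sc) with
           | [] => []
           | _ :: rest => PySem.Chars.splitOn rest [sc]) := by
  unfold PySem.Chars.splitOn
  rw [pvGo_split]
  rfl

lemma pvSplit_head (t : List Char) (sc : Char) :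
    (PySem.Chars.splitOn t [sc]).headD [] = t.takeWhile (fun c => c != sc) := by
  rw [pvSplitOn_eq]; rfl

-- dropping a right-strip of p-chars does not change the leading d-run (p, d disjoint)
lemma pvTakeWhile_rstrip (d p : Char → Bool) (hpd : ∀ c, p c = true → d c = false)
    (l : List Char) :
    (List.dropWhile p l.reverse).reverse.takeWhile d = l.takeWhile d := by
  induction l using List.reverseRecOn with
  | nil => simp
  | append_singleton l a ih =>
      rw [List.reverse_append, List.reverse_singleton, List.singleton_append,
        List.dropWhile_cons]
      by_cases h : p a = true
      · simp only [h, if_true]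
        rw [ih, List.takeWhile_append]
        by_cases hfull : (l.takeWhile d).length = l.length
        · have hl : l.takeWhile d = l := (List.takeWhile_sublist d).eq_of_length hfull
          simp [hfull, hl, List.takeWhile_cons, hpd a h]
        · simp [hfull]
      · simp [h]

-- the leading digit run ignores a later cut at '(' (digits are not '(')
lemma pvTW_digit_ne (l : List Char) :
    (l.takeWhile (fun c => c != '(')).takeWhile PySem.Chars.isdigit
      = l.takeWhile PySem.Chars.isdigit := by
  rw [List.takeWhile_takeWhile]
  congr 1
  funext a
  by_cases hd : PySem.Chars.isdigit a = true
  · simp [hd, pvDigit_not_lpar hd]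
  · simp [hd]

-- the leading digit run after the ATCGN prefix is the same with and without the
-- cut at '(', whenever that run is nonempty
lemma pvCut_comm (t : List Char)
    (h : PySem.Chars.isdigit
      (((t.takeWhile (fun c => c != '(')).dropWhile pvMemATCGN).headD ' ') = true) :
    ((t.takeWhile (fun c => c != '(')).dropWhile pvMemATCGN).takeWhile PySem.Chars.isdigit
      = (t.dropWhile pvMemATCGN).takeWhile PySem.Chars.isdigit := by
  induction t with
  | nil => simp
  | cons c rest ih =>
      by_cases hm : pvMemATCGN c = true
      · have hlp := pvMem_not_lpar hm
        rw [List.takeWhile_cons] at h ⊢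
        simp only [hlp, if_true] at h ⊢
        rw [List.dropWhile_cons] at h ⊢
        simp only [hm, if_true] at h ⊢
        rw [List.dropWhile_cons]
        simp only [hm, if_true]
        exact ih h
      · by_cases hlp : (c != '(') = true
        · rw [List.takeWhile_cons] at h ⊢
          simp only [hlp, if_true] at h ⊢
          rw [List.dropWhile_cons] at h ⊢
          simp only [hm, Bool.false_eq_true, if_false, List.headD_cons] at h ⊢
          rw [List.dropWhile_cons]
          simp only [hm, Bool.false_eq_true, if_false]
          rw [List.takeWhile_cons, List.takeWhile_cons]
          simp only [h, if_true]
          rw [pvTW_digit_ne]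
        · rw [List.takeWhile_cons] at h
          simp only [hlp, Bool.false_eq_true, if_false, List.dropWhile_nil] at h
          exact absurd h (by decide)

-- under Pre_'s per-token condition, the leading digit run is nonempty
lemma pvRun_ne (t : List Char)
    (h : PySem.Chars.isdigit
      (((t.takeWhile (fun c => c != '(')).dropWhile pvMemATCGN).headD ' ') = true) :
    (t.dropWhile pvMemATCGN).takeWhile PySem.Chars.isdigit ≠ [] := by
  intro hrun
  have hx := pvCut_comm t h
  rw [hrun] at hx
  cases hL : (t.takeWhile (fun c => c != '(')).dropWhile pvMemATCGN with
  | nil =>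
      rw [hL] at h
      exact absurd h (by decide)
  | cons x xs =>
      rw [hL] at h hx
      simp only [List.headD_cons] at h
      rw [List.takeWhile_cons] at hx
      simp only [h, if_true] at hx
      exact List.cons_ne_nil _ _ hx

-- A's piece, under Pre_'s per-token condition, is the Horner value of the run
lemma pvPieceA_eq (t : List Char)
    (h : PySem.Chars.isdigit
      (((t.takeWhile (fun c => c != '(')).dropWhile
          (fun c => (['A','T','C','G','N'] : List Char).contains c)).headD ' ') = true) :
    pvPieceA t = pvFmt06
      (((t.dropWhile pvMemATCGN).takeWhile PySem.Chars.isdigit).foldl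
        (fun m c => m * 10 + (c.toNat : Int) - 48) 0) ++ [' '] := by
  have h' : PySem.Chars.isdigit
      (((t.takeWhile (fun c => c != '(')).dropWhile pvMemATCGN).headD ' ') = true := h
  unfold pvPieceA
  rw [pvSplit_head]
  have hstrip : PySem.Chars.stripChars (t.takeWhile (fun c => c != '('))
        ['A','T','C','G','N']
      = (List.dropWhile pvMemATCGN
          ((List.dropWhile pvMemATCGN
            (t.takeWhile (fun c => c != '('))).reverse)).reverse := rfl
  rw [pvDigitsA_eq, hstrip, List.nil_append,
    pvTakeWhile_rstrip PySem.Chars.isdigit pvMemATCGN (fun c => pvMem_not_digit),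
    pvCut_comm t h']
  cases hrun : ((t.dropWhile pvMemATCGN).takeWhile PySem.Chars.isdigit) with
  | nil => exact absurd hrun (pvRun_ne t h')
  | cons x xs => rw [pvIntDigits?_cons]; rfl

-- B's machine on the non-space characters of one token (proof-side view of pvStepB)
def pvFsm : List Char → Option Int × Bool → Option Int × Bool
  | [], s => s
  | c :: rest, (n, d) =>
      if d then pvFsm rest (n, d)
      else if PySem.Chars.isdigit c then
        pvFsm rest (some (n.getD 0 * 10 + (c.toNat : Int) - 48), d)
      else if n = none ∧ pvMemATCGN c = true then pvFsm rest (n, d)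
      else pvFsm rest (n, true)

lemma pvFsm_done (l : List Char) (n : Option Int) : pvFsm l (n, true) = (n, true) := by
  induction l with
  | nil => rfl
  | cons c rest ih => rw [pvFsm]; simp only [if_true]; exact ih

lemma pvFsm_digits (l : List Char) (m : Int) :
    (pvFsm l (some m, false)).1
      = some ((l.takeWhile PySem.Chars.isdigit).foldl
          (fun a c => a * 10 + (c.toNat : Int) - 48) m) := by
  induction l generalizing m with
  | nil => rfl
  | cons c rest ih =>
      rw [pvFsm, List.takeWhile_cons]
      by_cases hd : PySem.Chars.isdigit c = true
      · simp only [hd, if_true, Bool.false_eq_true, if_false, List.foldl_cons,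
          Option.getD_some]
        exact ih _
      · have : ¬ ((some m : Option Int) = none ∧ pvMemATCGN c = true) := by
          rintro ⟨hh, _⟩; exact Option.some_ne_none m hh
        simp only [hd, Bool.false_eq_true, if_false, this, pvFsm_done]
        simp [hd]

-- the machine's value is int() of the leading digit run after the ATCGN prefix
lemma pvFsm_val (t : List Char) :
    (pvFsm t (none, false)).1
      = pvIntDigits? ((t.dropWhile pvMemATCGN).takeWhile PySem.Chars.isdigit) := by
  induction t with
  | nil => rfl
  | cons c rest ih =>
      rw [pvFsm, List.dropWhile_cons]
      by_cases hd : PySem.Chars.isdigit c = true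
      · have hm : pvMemATCGN c = false := by
          by_cases hmm : pvMemATCGN c = true
          · exact absurd hd (by simp [pvMem_not_digit hmm])
          · exact eq_false_of_ne_true hmm
        simp only [hd, if_true, Bool.false_eq_true, if_false, hm, List.takeWhile_cons]
        rw [pvFsm_digits, pvIntDigits?_cons]
        rfl
      · by_cases hm : pvMemATCGN c = true
        · simp only [hd, Bool.false_eq_true, if_false, hm, if_true,
            show ((none : Option Int) = none ∧ pvMemATCGN c = true) from ⟨rfl, hm⟩]
          exact ih
        · have hnm : ¬ ((none : Option Int) = none ∧ pvMemATCGN c = true) := by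
            rintro ⟨_, hh⟩; exact absurd hh hm
          simp only [hd, Bool.false_eq_true, if_false, hnm,
            eq_false_of_ne_true hm, pvFsm_done, List.takeWhile_cons]
          simp [hd]
          rfl

-- the piece B's machine emits for one token
def pvPieceFSM (t : List Char) : List Char :=
  pvFmt06 ((pvFsm t (none, false)).1.getD 0) ++ [' ']

-- folding pvStepB over space-free characters only runs the token machine
lemma pvFoldB_nospace (t : List Char) (ps : List (List Char)) (n : Option Int) (d : Bool)
    (ht : ∀ c ∈ t, ¬ (c = ' ')) :
    t.foldl pvStepB (ps, n, d) = (ps, pvFsm t (n, d)) := by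
  induction t generalizing n d with
  | nil => rfl
  | cons c rest ih =>
      have hc : ¬ (c = ' ') := ht c List.mem_cons_self
      have ht' : ∀ c' ∈ rest, ¬ (c' = ' ') := fun c' hc' => ht c' (List.mem_cons_of_mem _ hc')
      rw [List.foldl_cons, pvFsm]
      unfold pvStepB
      simp only [hc, if_false]
      by_cases hdone : d = true
      · subst hdone; simp only [if_true]; exact ih n true ht'
      · have hd0 : d = false := eq_false_of_ne_true hdone
        subst hd0
        simp only [Bool.false_eq_true, if_false]
        by_cases hdig : PySem.Chars.isdigit c = true
        · simp only [hdig, if_true]; exact ih _ false ht'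
        · simp only [hdig, Bool.false_eq_true, if_false]
          by_cases hsk : n = none ∧ pvMemATCGN c = true
          · rw [if_pos hsk, if_pos hsk]
            exact ih n false ht'
          · rw [if_neg hsk, if_neg hsk]
            exact ih n true ht'

-- the head of a nonempty dropWhile result fails the predicate
lemma pvDropWhile_head (p : Char → Bool) :
    ∀ (l : List Char) (c : Char) (rest : List Char),
      l.dropWhile p = c :: rest → p c = false := by
  intro l
  induction l with
  | nil => intro c rest h; simp at h
  | cons a t ih =>
      intro c rest h
      rw [List.dropWhile_cons] at h
      by_cases hp : p a = true
      · simp only [hp, if_true] at h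
        exact ih _ _ h
      · simp only [hp, Bool.false_eq_true, if_false] at h
        injection h with h1 h2
        subst h1
        exact eq_false_of_ne_true hp

-- the whole of B's loop over l + ' ' emits one piece per space-separated token
lemma pvFoldB_main (N : Nat) :
    ∀ (l : List Char), l.length ≤ N → ∀ (ps : List (List Char)),
      (l ++ [' ']).foldl pvStepB (ps, none, false)
        = (ps ++ (PySem.Chars.splitOn l [' ']).map pvPieceFSM, none, false) := by
  induction N with
  | zero =>
      intro l hl ps
      have h0 : l = [] := List.eq_nil_of_length_eq_zero (Nat.le_zero.mp hl)
      subst h0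
      simp [pvSplitOn_eq, pvStepB, pvPieceFSM, pvFsm]
  | succ N ih =>
      intro l hl ps
      have htw : ∀ c ∈ l.takeWhile (fun c => c != ' '), ¬ (c = ' ') := by
        intro c hc
        have := List.mem_takeWhile_imp hc
        simpa [bne_iff_ne] using this
      have hstep : ∀ (qs : List (List Char)) (t : List Char),
          pvStepB (qs, pvFsm t (none, false)) ' ' = (qs ++ [pvPieceFSM t], none, false) := by
        intro qs t
        simp [pvStepB, pvPieceFSM]
      rw [pvSplitOn_eq]
      cases hdw : l.dropWhile (fun c => c != ' ') with
      | nil =>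
          have hlt : l.takeWhile (fun c => c != ' ') = l := by
            conv_rhs => rw [← List.takeWhile_append_dropWhile (p := fun c => c != ' ') (l := l)]
            rw [hdw, List.append_nil]
          rw [List.foldl_append,
            pvFoldB_nospace l ps none false (hlt ▸ htw),
            List.foldl_cons, List.foldl_nil, hstep, hlt]
          simp
      | cons c rest =>
          have hc : c = ' ' := by
            have := pvDropWhile_head (fun c => c != ' ') l c rest hdw
            simpa using this
          subst hc
          have hlen : rest.length ≤ N := by
            have h1 : (l.dropWhile (fun c => c != ' ')).length ≤ l.length :=
              List.length_dropWhile_le _ _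
            rw [hdw, List.length_cons] at h1
            omega
          have heq : l ++ [' ']
              = l.takeWhile (fun c => c != ' ') ++ (' ' :: (rest ++ [' '])) := by
            conv_lhs =>
              rw [← List.takeWhile_append_dropWhile (p := fun c => c != ' ') (l := l), hdw]
            simp
          rw [heq, List.foldl_append, pvFoldB_nospace _ ps none false htw,
            List.foldl_cons, hstep, ih rest hlen]
          simp

-- per-token equality: under Pre_'s condition, A's piece is B's piece
lemma pvPiece_eq (t : List Char)
    (h : PySem.Chars.isdigit
      (((t.takeWhile (fun c => c != '(')).dropWhile
          (fun c => (['A','T','C','G','N'] : List Char).contains c)).headD ' ') = true) :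
    pvPieceA t = pvPieceFSM t := by
  have h' : PySem.Chars.isdigit
      (((t.takeWhile (fun c => c != '(')).dropWhile pvMemATCGN).headD ' ') = true := h
  rw [pvPieceA_eq t h]
  unfold pvPieceFSM
  rw [pvFsm_val]
  cases hrun : ((t.dropWhile pvMemATCGN).takeWhile PySem.Chars.isdigit) with
  | nil => exact absurd hrun (pvRun_ne t h')
  | cons x xs => rw [pvIntDigits?_cons]; rfl

lemma pvJoin_nil_flatten (parts : List (List Char)) :
    PySem.Chars.join [] parts = parts.flatten := by
  induction parts with
  | nil => simp [PySem.Chars.join_nil]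
  | cons p rest ih =>
      cases rest with
      | nil => simp [PySem.Chars.join_singleton]
      | cons q rr =>
          rw [PySem.Chars.join_cons_cons]
          simp only [List.flatten_cons] at ih ⊢
          rw [← ih]
          simp

-- ===== VERDICT (by name: the statement is the Claim_ definition above) =====
theorem mut_pos_stringer_spec : Claim_equal_mut_pos_stringer := by
  intro muts _dom hpre
  unfold Spec_mut_pos_stringer mut_pos_stringer mut_pos_stringer_alt
  rw [pvFoldB_main muts.toList.length muts.toList le_rfl [], List.nil_append,
    pvJoin_nil_flatten, PySem.List.foldl_append_eq_flatMap, List.nil_append,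
    List.flatMap_def]
  exact congrArg (fun ts => String.mk ts.flatten)
    (List.map_congr_left fun t ht => pvPiece_eq t (hpre t ht))
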